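-- pv_equiv track=rewrite | github.com/reginaib/Programming | Series_06/manhattan.py | critical
-- ===== SOURCE A (Python) =====
-- def manhattanDistance(point1, point2):
--
--     """
--     >>> manhattanDistance((3, 5), (7, 9))
--     8
--     >>> manhattanDistance((12, 5), (3, 16))
--     20
--     """
--
--     return abs(point1[0] - point2[0]) + abs(point1[1] - point2[1])
--
-- def critical(point, stations):
--
--     """
--     >>> critical((4, 3), [(1, 8), (4, 3), (6, 3), (6, 5)])
--     False
--     >>> critical((7, 4), [(1, 8), (4, 3), (6, 3), (6, 5)])
--     True
--     """
--
--     # determine number of gas stations that are closest to the given point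
--     closest, count = None, 0
--     for station in stations:
--         distance = manhattanDistance(point, station)
--         if closest == None or distance < closest:
--             closest = distance
--             count = 1
--         elif distance == closest:
--             count += 1
--
--     # return whether there are multiple gas stations that are closest to the
--     # given point
--     return count > 1
-- ===== SOURCE B (Python) =====
-- def manhattanDistance(point1, point2):
--     return abs(point1[0] - point2[0]) + abs(point1[1] - point2[1])
--
-- def critical(point, stations):
--     if not stations:
--         return False
--     dists = [manhattanDistance(point, s) for s in stations]
--     return dists.count(min(dists)) > 1
-- ===== Notes on version B (the rewrite author's own statement) =====
-- stated objective: simpler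
-- what changed: Replaces the online min-with-count state machine by building the distance list once and reducing it with min and count (empty list guarded up front).
import Mathlib
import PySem

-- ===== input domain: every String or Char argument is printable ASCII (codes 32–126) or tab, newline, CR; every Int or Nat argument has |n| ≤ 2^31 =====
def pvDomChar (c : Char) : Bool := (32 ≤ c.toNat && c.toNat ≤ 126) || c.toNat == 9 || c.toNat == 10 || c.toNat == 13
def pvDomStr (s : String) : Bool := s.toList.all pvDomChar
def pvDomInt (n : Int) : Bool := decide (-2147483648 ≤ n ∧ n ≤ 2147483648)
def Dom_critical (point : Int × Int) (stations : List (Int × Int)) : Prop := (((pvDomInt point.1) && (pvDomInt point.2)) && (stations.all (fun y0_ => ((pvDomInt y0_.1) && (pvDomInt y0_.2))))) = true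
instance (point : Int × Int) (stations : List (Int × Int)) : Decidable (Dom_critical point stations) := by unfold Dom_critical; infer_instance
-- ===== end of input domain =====

-- ===== PORT A =====
-- B differs from A only in decomposition: distance list + min/count instead of an online loop; same values everywhere.
def manhattanDist (point1 point2 : Int × Int) : Int :=
  |point1.1 - point2.1| + |point1.2 - point2.2|

-- the loop body of A, acting on the already-computed distance
def critStep : Option Int × Int → Int → Option Int × Int
  | (none, _), d => (some d, 1)
  | (some closest, count), d =>
    if d < closest then (some d, 1)
    else if d = closest then (some closest, count + 1)
    else (some closest, count)

def critical (point : Int × Int) (stations : List (Int × Int)) : Bool :=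
  let st := stations.foldl (fun s station => critStep s (manhattanDist point station)) (none, 0)
  decide (1 < st.2)

-- ===== PORT B =====
def manhattanDistB (point1 point2 : Int × Int) : Int :=
  |point1.1 - point2.1| + |point1.2 - point2.2|

def critical_alt (point : Int × Int) (stations : List (Int × Int)) : Bool :=
  if stations = [] then false
  else
    let dists := stations.map (fun s => manhattanDistB point s)
    match PySem.List.min? dists (fun x => x) with
    | none => false  -- unreachable: dists nonempty
    | some m => decide (1 < (PySem.List.count dists m : Int))

-- ===== PRECONDITION & SPEC =====
def Spec_critical (point : Int × Int) (stations : List (Int × Int)) (out : Bool) : Prop := out = critical_alt point stations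
instance (point : Int × Int) (stations : List (Int × Int)) (out : Bool) : Decidable (Spec_critical point stations out) := by unfold Spec_critical; infer_instance

-- ===== CLAIM (what is proved, stated in full; the proofs are below) =====
def Claim_equal_critical : Prop := ∀ (point : Int × Int) (stations : List (Int × Int)), Dom_critical point stations → Spec_critical point stations (critical point stations)

-- ===== LEMMAS AND PROOFS =====

theorem critStep_loop (l : List Int) (c k : Int) :
    l.foldl critStep (some c, k) =
      (some (l.foldl min c),
       (if l.foldl min c = c then k else 0) + (l.count (l.foldl min c) : Int)) := by
  induction l generalizing c k with
  | nil => simp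
  | cons d t ih =>
    simp only [List.foldl_cons]
    by_cases h1 : d < c
    · have hstep : critStep (some c, k) d = (some d, 1) := by simp [critStep, h1]
      have hcd : min c d = d := by omega
      rw [hstep, ih d 1]; simp only [hcd]
      have hle := (PySem.List.foldl_min_le t d).1
      have hne : t.foldl min d ≠ c := by omega
      rw [if_neg hne]
      simp only [List.count_cons, beq_iff_eq]
      by_cases hdm : t.foldl min d = d <;> simp [hdm] <;> omega
    · by_cases h2 : d = c
      · have hstep : critStep (some c, k) d = (some c, k + 1) := by
          simp [critStep, h2]
        have hcd : min c d = c := by omega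
        rw [hstep, ih c (k + 1)]; simp only [hcd]
        simp only [List.count_cons, beq_iff_eq, h2]
        by_cases hm2 : t.foldl min c = c <;> simp [hm2] <;> omega
      · have hstep : critStep (some c, k) d = (some c, k) := by
          simp [critStep, h1, h2]
        have hcd : min c d = c := by omega
        rw [hstep, ih c k]; simp only [hcd]
        have hle := (PySem.List.foldl_min_le t c).1
        have hne : t.foldl min c ≠ d := by omega
        simp only [List.count_cons, beq_iff_eq]
        rw [if_neg (show ¬ d = List.foldl min c t from fun h => hne h.symm)]
        simp

-- ===== VERDICT (by name: the statement is the Claim_ definition above) =====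
theorem critical_spec : Claim_equal_critical := by
  intro point stations _
  unfold Spec_critical critical critical_alt
  cases stations with
  | nil => simp
  | cons s rest =>
    simp only [List.foldl_cons, List.map_cons, reduceCtorEq, if_false]
    have h0 : critStep ((none : Option Int), (0 : Int)) (manhattanDist point s)
        = (some (manhattanDist point s), 1) := rfl
    simp only [h0]
    rw [← List.foldl_map, critStep_loop]
    have hAB : manhattanDistB = manhattanDist := rfl
    rw [hAB, PySem.List.min?_id_cons, decide_eq_decide]
    simp only [PySem.List.count, List.count_cons, beq_iff_eq]
    simp only [eq_comm, show (fun s => manhattanDist point s) = manhattanDist point from rfl]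
    split_ifs with h <;> push_cast <;> omega
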